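-- pv_equiv track=rewrite | github.com/manyiu/leetcode_python | 1639_number-of-ways-to-form-a-target-string-given-a-dictionary.py | numWays
-- ===== SOURCE A (Python) =====
-- from collections import defaultdict
-- from typing import List
--
-- def numWays(words: List[str], target: str) -> int:
--     mod = 10**9 + 7
--
--     count = defaultdict(int)
--
--     for word in words:
--         for i, char in enumerate(word):
--             count[(i, char)] += 1
--
--     cache = {}
--
--     def dfs(i, j):
--         if i == len(target):
--             return 1
--
--         if j == len(words[0]):
--             return 0
--
--         if (i, j) in cache:
--             return cache[(i, j)]
--
--         cache[(i, j)] = dfs(i, j + 1)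
--         cache[(i, j)] += count[(j, target[i])] * dfs(i + 1, j + 1)
--
--         return cache[(i, j)] % mod
--
--     return dfs(0, 0)
-- ===== SOURCE B (Python) =====
-- from collections import Counter
-- from typing import List
--
-- def numWays(words: List[str], target: str) -> int:
--     mod = 10**9 + 7
--     count = Counter((i, c) for word in words for i, c in enumerate(word))
--     if not target:
--         return 1
--     m = len(words[0])
--     n = len(target)
--     dp = [0] * n + [1]  # dp[i] = ways to form target[i:] using columns >= current j
--     for j in range(m - 1, -1, -1):
--         dp = [(dp[i] + count[(j, target[i])] * dp[i + 1]) % mod for i in range(n)] + [1]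
--     return dp[0]
-- ===== Notes on version B (the rewrite author's own statement) =====
-- stated objective: simpler
-- what changed: Replaces the memoized top-down dfs (recursion + cache dict) with a bottom-up dp array swept once per word column, built by a list comprehension; the (position,char) table is built with collections.Counter.
import Mathlib
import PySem

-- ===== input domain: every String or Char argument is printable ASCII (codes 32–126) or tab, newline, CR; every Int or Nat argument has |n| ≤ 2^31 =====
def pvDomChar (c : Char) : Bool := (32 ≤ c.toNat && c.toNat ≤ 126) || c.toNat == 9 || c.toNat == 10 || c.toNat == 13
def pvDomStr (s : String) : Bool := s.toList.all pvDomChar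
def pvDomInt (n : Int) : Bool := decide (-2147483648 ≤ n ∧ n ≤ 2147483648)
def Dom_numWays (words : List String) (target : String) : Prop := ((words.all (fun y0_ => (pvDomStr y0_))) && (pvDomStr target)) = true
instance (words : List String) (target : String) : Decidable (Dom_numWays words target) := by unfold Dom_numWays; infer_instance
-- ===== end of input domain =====

-- B replaces A's memoized top-down dfs with a bottom-up dp over the columns (objective: simpler, no cache);
-- the (position, char) frequency table is built with a Counter. Equal return values on Pre_.

-- ===== PORT A =====
-- memoized dfs; the cache dict is threaded through explicitly.
-- Python's test `j == len(words[0])` is written `W ≤ j` (identical on every reachable call, where j ≤ W)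
-- so that `W - j` is a termination measure; `tgt.getD i ' '` is Python's in-range `target[i]` (guarded by i ≠ len(target)).
def dfsA (tgt : List Char) (W : Nat) (cnt : PySem.Dict (Int × Char) Int) (i j : Nat)
    (cache : PySem.Dict (Nat × Nat) Int) : Int × PySem.Dict (Nat × Nat) Int :=
  if i = tgt.length then (1, cache)
  else if W ≤ j then (0, cache)
  else match cache.get? (i, j) with
    | some v => (v, cache)
    | none =>
      let r1 := dfsA tgt W cnt i (j + 1) cache
      let c2 := r1.2.insert (i, j) r1.1
      let r2 := dfsA tgt W cnt (i + 1) (j + 1) c2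
      let s := r2.2.getD (i, j) 0 + cnt.getD ((j : Int), tgt.getD i ' ') 0 * r2.1
      (PySem.Int.mod s 1000000007, r2.2.insert (i, j) s)
termination_by W - j
decreasing_by all_goals omega

-- `words.headD ""` is Python's `words[0]`; it differs only where Python raises IndexError (words = [] with
-- nonempty target), which Pre_ excludes.
def numWays (words : List String) (target : String) : Int :=
  let cnt := words.foldl
    (fun d w => (PySem.List.enumerate w.toList 0).foldl (fun d p => d.modify p 0 (· + 1)) d)
    PySem.Dict.empty
  (dfsA target.toList (words.headD "").toList.length cnt 0 0 PySem.Dict.empty).1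

-- ===== PORT B =====
-- one dp column update: dp = [(dp[i] + count[(j, target[i])] * dp[i+1]) % mod for i in range(n)] + [1]
def dpColumn (cnt : PySem.Dict (Int × Char) Int) (tgt : List Char) (n : Nat) (dp : List Int) (j : Int) : List Int :=
  (PySem.List.pyRange 0 (n : Int) 1).map
    (fun i => PySem.Int.mod
      (PySem.List.pyGetD dp i 0 + cnt.getD (j, PySem.List.pyGetD tgt i ' ') 0 * PySem.List.pyGetD dp (i + 1) 0)
      1000000007) ++ [1]

-- `words.headD ""` is Python's `words[0]`, reached only when target ≠ ""; see Pre_.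
def numWays_alt (words : List String) (target : String) : Int :=
  let cnt := PySem.Dict.counter (words.flatMap (fun w => PySem.List.enumerate w.toList 0))
  if target.toList = [] then 1
  else
    let n := target.toList.length
    let m := (words.headD "").toList.length
    let dp0 : List Int := List.replicate n 0 ++ [1]
    let dpf := (PySem.List.pyRange ((m : Int) - 1) (-1) (-1)).foldl (dpColumn cnt target.toList n) dp0
    PySem.List.pyGetD dpf 0 0

-- ===== PRECONDITION & SPEC =====
-- Pre_ excludes exactly the inputs where A raises IndexError (empty words with nonempty target); B raises there too.
def Pre_numWays (words : List String) (target : String) : Prop := words ≠ [] ∨ target = ""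
instance (words : List String) (target : String) : Decidable (Pre_numWays words target) := by
  unfold Pre_numWays; infer_instance

def pvWitness_numWays : List String × String := (["acca", "bbbb", "caca"], "aba")

def Spec_numWays (words : List String) (target : String) (out : Int) : Prop := out = numWays_alt words target
instance (words : List String) (target : String) (out : Int) : Decidable (Spec_numWays words target out) := by
  unfold Spec_numWays; infer_instance

-- ===== CLAIM (what is proved, stated in full; the proofs are below) =====
def Claim_equal_numWays : Prop := ∀ (words : List String) (target : String),
  Dom_numWays words target → Pre_numWays words target → Spec_numWays words target (numWays words target)

-- ===== LEMMAS AND PROOFS =====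

-- the exact (un-modded) number of ways to form tgt[i:] from columns ≥ j
def Fways (tgt : List Char) (W : Nat) (cnt : PySem.Dict (Int × Char) Int) (i j : Nat) : Int :=
  if i = tgt.length then 1
  else if W ≤ j then 0
  else Fways tgt W cnt i (j + 1) + cnt.getD ((j : Int), tgt.getD i ' ') 0 * Fways tgt W cnt (i + 1) (j + 1)
termination_by W - j
decreasing_by all_goals omega

-- A's nested count-building fold equals the flat fold over the flattened pair list
theorem foldl_foldl_eq_flatMap {α β γ : Type} (g : α → List β) (step : γ → β → γ) :
    ∀ (ws : List α) (d : γ),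
      ws.foldl (fun d w => (g w).foldl step d) d = (ws.flatMap g).foldl step d := by
  intro ws
  induction ws with
  | nil => intro d; rfl
  | cons w rest ih => intro d; simp [List.flatMap_cons, List.foldl_append, ih]

theorem cnt_eq (words : List String) :
    words.foldl
      (fun d w => (PySem.List.enumerate w.toList 0).foldl (fun d p => d.modify p 0 (· + 1)) d)
      PySem.Dict.empty
    = PySem.Dict.counter (words.flatMap (fun w => PySem.List.enumerate w.toList 0)) := by
  rw [PySem.Dict.counter_eq_foldl, foldl_foldl_eq_flatMap]

def CacheOK (tgt : List Char) (W : Nat) (cnt : PySem.Dict (Int × Char) Int)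
    (cache : PySem.Dict (Nat × Nat) Int) : Prop :=
  ∀ i j v, cache.get? (i, j) = some v → v % 1000000007 = Fways tgt W cnt i j % 1000000007

theorem dfsA_ok (tgt : List Char) (W : Nat) (cnt : PySem.Dict (Int × Char) Int) :
    ∀ (d i j : Nat) (cache : PySem.Dict (Nat × Nat) Int), W - j ≤ d →
      (∀ i' j' v, i ≤ i' → cache.get? (i', j') = some v →
          v % 1000000007 = Fways tgt W cnt i' j' % 1000000007) →
      (dfsA tgt W cnt i j cache).1 % 1000000007 = Fways tgt W cnt i j % 1000000007 ∧
      (∀ k v, cache.get? k = some v → (dfsA tgt W cnt i j cache).2.get? k = some v) ∧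
      (∀ i' j' v, (dfsA tgt W cnt i j cache).2.get? (i', j') = some v →
          cache.get? (i', j') = some v ∨
          (i ≤ i' ∧ v % 1000000007 = Fways tgt W cnt i' j' % 1000000007)) ∧
      ((dfsA tgt W cnt i j cache).1 % 1000000007 = (dfsA tgt W cnt i j cache).1 ∨
        ∃ v, cache.get? (i, j) = some v ∧ (dfsA tgt W cnt i j cache).1 = v) := by
  intro d
  induction d with
  | zero =>
    intro i j cache hd hH
    by_cases hi : i = tgt.length
    · rw [dfsA, Fways]
      simp only [if_pos hi]
      refine ⟨by simp, fun k v hk => hk, fun i' j' v hv => Or.inl hv, Or.inl (by norm_num)⟩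
    · have hWj : W ≤ j := by omega
      rw [dfsA, Fways]
      simp only [if_neg hi, if_pos hWj]
      refine ⟨by simp, fun k v hk => hk, fun i' j' v hv => Or.inl hv, Or.inl (by norm_num)⟩
  | succ d ih =>
    intro i j cache hd hH
    by_cases hi : i = tgt.length
    · rw [dfsA, Fways]
      simp only [if_pos hi]
      refine ⟨by simp, fun k v hk => hk, fun i' j' v hv => Or.inl hv, Or.inl (by norm_num)⟩
    · by_cases hWj : W ≤ j
      · rw [dfsA, Fways]
        simp only [if_neg hi, if_pos hWj]
        refine ⟨by simp, fun k v hk => hk, fun i' j' v hv => Or.inl hv, Or.inl (by norm_num)⟩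
      · cases hc : cache.get? (i, j) with
        | some v =>
          have hdfs : dfsA tgt W cnt i j cache = (v, cache) := by
            rw [dfsA]; simp only [if_neg hi, if_neg hWj, hc]
          rw [hdfs]
          refine ⟨hH i j v le_rfl hc, fun k v hk => hk, fun i' j' v hv => Or.inl hv, ?_⟩
          exact Or.inr ⟨v, rfl, rfl⟩
        | none =>
          obtain ⟨ih1a, ih1b, ih1c, _⟩ := ih i (j + 1) cache (by omega) hH
          have hH2 : ∀ i' j' v, i + 1 ≤ i' →
              ((dfsA tgt W cnt i (j + 1) cache).2.insert (i, j)
                (dfsA tgt W cnt i (j + 1) cache).1).get? (i', j') = some v →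
              v % 1000000007 = Fways tgt W cnt i' j' % 1000000007 := by
            intro i' j' v hge hget
            rw [PySem.Dict.get?_insert_of_ne _ _
              (by simp only [ne_eq, Prod.mk.injEq, not_and]; omega)] at hget
            rcases ih1c i' j' v hget with h | ⟨_, h⟩
            · exact hH i' j' v (by omega) h
            · exact h
          obtain ⟨ih2a, ih2b, ih2c, _⟩ := ih (i + 1) (j + 1) _ (by omega) hH2
          have hkey : (dfsA tgt W cnt (i + 1) (j + 1)
              ((dfsA tgt W cnt i (j + 1) cache).2.insert (i, j)
                (dfsA tgt W cnt i (j + 1) cache).1)).2.get? (i, j) =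
              some (dfsA tgt W cnt i (j + 1) cache).1 :=
            ih2b _ _ (PySem.Dict.get?_insert_self _ _ _)
          have hgetD : (dfsA tgt W cnt (i + 1) (j + 1)
              ((dfsA tgt W cnt i (j + 1) cache).2.insert (i, j)
                (dfsA tgt W cnt i (j + 1) cache).1)).2.getD (i, j) 0 =
              (dfsA tgt W cnt i (j + 1) cache).1 :=
            PySem.Dict.getD_of_get?_eq_some _ 0 hkey
          -- names for the pieces
          set r1 := dfsA tgt W cnt i (j + 1) cache with hr1
          set c2 := r1.2.insert (i, j) r1.1 with hc2
          set r2 := dfsA tgt W cnt (i + 1) (j + 1) c2 with hr2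
          set C := cnt.getD ((j : Int), tgt.getD i ' ') 0 with hC
          set s := r2.2.getD (i, j) 0 + C * r2.1 with hs
          have hdfs : dfsA tgt W cnt i j cache =
              (PySem.Int.mod s 1000000007, r2.2.insert (i, j) s) := by
            rw [dfsA]; simp only [if_neg hi, if_neg hWj, hc]
            rfl
          have hsmod : s % 1000000007 = Fways tgt W cnt i j % 1000000007 := by
            rw [hs, hgetD]
            conv_rhs => rw [Fways]
            simp only [if_neg hi, if_neg hWj]
            exact Int.ModEq.add ih1a (Int.ModEq.mul_left C ih2a)
          have hmod : PySem.Int.mod s 1000000007 = s % 1000000007 :=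
            PySem.Int.mod_eq_emod_of_pos (by norm_num)
          rw [hdfs]
          refine ⟨?_, ?_, ?_, ?_⟩
          · show PySem.Int.mod s 1000000007 % 1000000007 = _
            rw [hmod, Int.emod_emod_of_dvd s dvd_rfl]; exact hsmod
          · intro k v hk
            have hkne : k ≠ (i, j) := by
              intro he; rw [he, hc] at hk; cases hk
            rw [PySem.Dict.get?_insert_of_ne _ _ hkne]
            exact ih2b k v (by rw [hc2, PySem.Dict.get?_insert_of_ne _ _ hkne]; exact ih1b k v hk)
          · intro i' j' v hv
            by_cases he : ((i' : Nat), (j' : Nat)) = ((i : Nat), (j : Nat))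
            · have h1 : i' = i := congrArg Prod.fst he
              have h2 : j' = j := congrArg Prod.snd he
              subst h1; subst h2
              rw [PySem.Dict.get?_insert_self] at hv
              have hv' : s = v := Option.some.inj hv
              subst hv'
              exact Or.inr ⟨le_rfl, hsmod⟩
            · rw [PySem.Dict.get?_insert_of_ne _ _ he] at hv
              rcases ih2c i' j' v hv with h2 | ⟨hge, h2⟩
              · rw [hc2, PySem.Dict.get?_insert_of_ne _ _ he] at h2
                rcases ih1c i' j' v h2 with h1 | ⟨hge, h1⟩
                · exact Or.inl h1
                · exact Or.inr ⟨hge, h1⟩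
              · exact Or.inr ⟨by omega, h2⟩
          · exact Or.inl (by rw [hmod]; exact Int.emod_emod_of_dvd s dvd_rfl)

-- B-side: the dp list after processing columns m-1 … j is pointwise Fways · j mod 10^9+7
def dpAt (tgt : List Char) (W : Nat) (cnt : PySem.Dict (Int × Char) Int) (j : Nat) : List Int :=
  (List.range (tgt.length + 1)).map (fun i => Fways tgt W cnt i j % 1000000007)

theorem dpAt_getD (tgt : List Char) (W : Nat) (cnt : PySem.Dict (Int × Char) Int)
    (j i : Nat) (hi : i < tgt.length + 1) :
    (dpAt tgt W cnt j).getD i 0 = Fways tgt W cnt i j % 1000000007 := by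
  unfold dpAt
  rw [PySem.List.getD_map_range _ _ _ _ hi]

theorem dpColumn_dpAt (tgt : List Char) (W : Nat) (cnt : PySem.Dict (Int × Char) Int)
    (j : Nat) (hj : j < W) :
    dpColumn cnt tgt tgt.length (dpAt tgt W cnt (j + 1)) (j : Int) = dpAt tgt W cnt j := by
  unfold dpColumn
  rw [PySem.List.pyRange_one]
  rw [show (((tgt.length : Int) - 0)).toNat = tgt.length by simp]
  have hsplit : dpAt tgt W cnt j =
      (List.range tgt.length).map (fun i => Fways tgt W cnt i j % 1000000007) ++ [1] := by
    unfold dpAt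
    rw [List.range_succ]
    simp only [List.map_append, List.map_cons, List.map_nil]
    rw [Fways]
    simp
  rw [hsplit]
  simp only [List.map_map]
  congr 1
  apply List.map_congr_left
  intro k hk
  have hkn : k < tgt.length := List.mem_range.mp hk
  simp only [Function.comp_apply]
  rw [show (0 : Int) + (k : Int) = ((k : Nat) : Int) by simp]
  rw [show ((k : Nat) : Int) + 1 = (((k + 1 : Nat)) : Int) by push_cast; ring]
  rw [PySem.List.pyGetD_natCast, PySem.List.pyGetD_natCast, PySem.List.pyGetD_natCast]
  rw [dpAt_getD _ _ _ _ _ (by omega), dpAt_getD _ _ _ _ _ (by omega)]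
  rw [PySem.Int.mod_eq_emod_of_pos (by norm_num)]
  conv_rhs => rw [Fways]
  simp only [if_neg (Nat.ne_of_lt hkn), if_neg (by omega : ¬ W ≤ j)]
  exact Int.ModEq.add (Int.emod_emod_of_dvd _ dvd_rfl)
    (Int.ModEq.mul_left _ (Int.emod_emod_of_dvd _ dvd_rfl))

theorem fold_cols (tgt : List Char) (W : Nat) (cnt : PySem.Dict (Int × Char) Int) :
    ∀ (a : Nat), a ≤ W →
      (PySem.List.pyRange ((a : Int) - 1) (-1) (-1)).foldl (dpColumn cnt tgt tgt.length) (dpAt tgt W cnt a)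
      = dpAt tgt W cnt 0 := by
  intro a
  induction a with
  | zero =>
    intro _
    rw [show ((0 : Nat) : Int) - 1 = -1 by simp, PySem.List.pyRange_neg_one_eq_nil le_rfl]
    rfl
  | succ a ih =>
    intro ha
    rw [show (((a + 1 : Nat)) : Int) - 1 = (a : Int) by push_cast; ring]
    rw [PySem.List.pyRange_neg_one_cons (by omega), List.foldl_cons]
    rw [dpColumn_dpAt tgt W cnt a (by omega)]
    have h1 : ((a : Int) - 1) = ((a : Nat) : Int) - 1 := rfl
    rw [h1]
    exact ih (by omega)

theorem dp0_eq (tgt : List Char) (W : Nat) (cnt : PySem.Dict (Int × Char) Int) :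
    (List.replicate tgt.length (0 : Int) ++ [1]) = dpAt tgt W cnt W := by
  apply List.ext_getElem
  · simp [dpAt]
  · intro i h1 h2
    simp only [dpAt, List.getElem_map, List.getElem_range]
    by_cases hi : i < tgt.length
    · rw [List.getElem_append_left (by simpa using hi)]
      rw [Fways]
      simp [Nat.ne_of_lt hi]
    · have hieq : i = tgt.length := by
        have : i < tgt.length + 1 := by simpa [dpAt] using h2
        omega
      subst hieq
      rw [List.getElem_append_right (by simp)]
      rw [Fways]
      simp

theorem numWays_alt_eq (words : List String) (target : String) (h : target.toList ≠ []) :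
    numWays_alt words target =
      Fways target.toList (words.headD "").toList.length
        (PySem.Dict.counter (words.flatMap (fun w => PySem.List.enumerate w.toList 0))) 0 0 % 1000000007 := by
  simp only [numWays_alt, if_neg h]
  rw [dp0_eq target.toList (words.headD "").toList.length
        (PySem.Dict.counter (words.flatMap (fun w => PySem.List.enumerate w.toList 0)))]
  rw [fold_cols _ _ _ _ le_rfl]
  unfold dpAt
  rw [PySem.List.pyGetD_ofNat']
  exact PySem.List.getD_map_range _ _ _ _ (Nat.succ_pos _)

theorem numWays_eq (words : List String) (target : String) :
    numWays words target =
      Fways target.toList (words.headD "").toList.length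
        (PySem.Dict.counter (words.flatMap (fun w => PySem.List.enumerate w.toList 0))) 0 0 % 1000000007 := by
  have hH : ∀ (i' j' : Nat) (v : Int), 0 ≤ i' →
      (PySem.Dict.empty : PySem.Dict (Nat × Nat) Int).get? (i', j') = some v →
      v % 1000000007 = Fways target.toList (words.headD "").toList.length
        (PySem.Dict.counter (words.flatMap (fun w => PySem.List.enumerate w.toList 0))) i' j' % 1000000007 := by
    intro i' j' v _ hv
    rw [PySem.Dict.get?_empty] at hv
    cases hv
  obtain ⟨h1, _, _, h4⟩ := dfsA_ok target.toList (words.headD "").toList.length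
    (PySem.Dict.counter (words.flatMap (fun w => PySem.List.enumerate w.toList 0)))
    ((words.headD "").toList.length) 0 0 PySem.Dict.empty (by omega) hH
  simp only [numWays]
  rw [cnt_eq]
  rcases h4 with h4 | ⟨v, hv, _⟩
  · rw [← h4]; exact h1
  · rw [PySem.Dict.get?_empty] at hv; cases hv

-- ===== VERDICT (by name: the statement is the Claim_ definition above) =====
theorem numWays_spec : Claim_equal_numWays := by
  intro words target _ _
  unfold Spec_numWays
  by_cases h : target.toList = []
  · simp [numWays, numWays_alt, dfsA, h]
  · rw [numWays_eq words target, numWays_alt_eq words target h]
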